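-- pv_equiv track=rewrite | github.com/sugipamo/project-cph | old_src_check/processors/auto_correct/file_organizers/file_splitter.py | _filter_needed_imports
-- ===== SOURCE A (Python) =====
-- from typing import Dict, List, Set, Tuple, Optional, Any, Union
--
-- def _filter_needed_imports(imports: List[str], code: str) -> List[str]:
--     needed = []
--     for imp in imports:
--         if 'import' in imp:
--             parts = imp.split()
--             if len(parts) >= 2:
--                 module_or_name = parts[-1]
--                 if module_or_name in code:
--                     needed.append(imp)
--     return needed
-- ===== SOURCE B (Python) =====
-- def _filter_needed_imports(imports, code):
--     # Two-phase: extract each import's key token once, precompute the set of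
--     # tokens that occur in the code, then keep imports whose token is in that set.
--     def _token(imp):
--         if 'import' in imp:
--             parts = imp.split()
--             if len(parts) >= 2:
--                 return parts[-1]
--         return None
--     present = {t for t in (_token(imp) for imp in imports) if t is not None and t in code}
--     return [imp for imp in imports if _token(imp) in present]
-- ===== Notes on version B (the rewrite author's own statement) =====
-- stated objective: alternative
-- what changed: A scans code inside the per-import loop; B first maps each import to its key token, builds the set of distinct tokens found in code in one pass, then filters imports by set membership, so each distinct token is searched in code only once.
import Mathlib
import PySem

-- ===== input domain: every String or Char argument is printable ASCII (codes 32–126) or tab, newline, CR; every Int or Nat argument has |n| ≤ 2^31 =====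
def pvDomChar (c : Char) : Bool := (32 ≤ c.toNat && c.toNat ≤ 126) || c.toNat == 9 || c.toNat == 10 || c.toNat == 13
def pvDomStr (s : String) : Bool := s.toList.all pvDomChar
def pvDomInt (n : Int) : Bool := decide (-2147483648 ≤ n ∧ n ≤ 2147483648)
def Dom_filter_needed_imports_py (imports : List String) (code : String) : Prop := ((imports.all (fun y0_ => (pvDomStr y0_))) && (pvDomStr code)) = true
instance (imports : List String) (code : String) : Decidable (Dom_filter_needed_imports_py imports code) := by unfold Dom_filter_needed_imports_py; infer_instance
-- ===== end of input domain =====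

-- B replaces A's per-import substring scan of code by a two-phase pass:
-- tokens are extracted first, the set of tokens present in code is built once,
-- and imports are then filtered by set membership (alternative decomposition).

-- ===== PORT A =====
def filter_needed_imports_py (imports : List String) (code : String) : List String :=
  imports.foldl (fun needed imp =>
    if PySem.Str.isIn "import" imp then
      let parts := PySem.Str.split₀ imp
      if 2 ≤ parts.length then
        let module_or_name := PySem.List.pyGetD parts (-1) ""
        if PySem.Str.isIn module_or_name code then needed ++ [imp] else needed
      else needed
    else needed) []

-- ===== PORT B =====
-- B's helper _token
def pvToken (imp : String) : Option String :=
  if PySem.Str.isIn "import" imp then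
    let parts := PySem.Str.split₀ imp
    if 2 ≤ parts.length then some (PySem.List.pyGetD parts (-1) "") else none
  else none

def filter_needed_imports_py_alt (imports : List String) (code : String) : List String :=
  let present : PySem.Set String :=
    PySem.Set.ofList ((imports.filterMap pvToken).filter (fun t => PySem.Str.isIn t code))
  imports.filter (fun imp =>
    match pvToken imp with
    | some t => PySem.Set.contains present t
    | none => false)

-- ===== PRECONDITION & SPEC =====
def Spec_filter_needed_imports_py (imports : List String) (code : String) (out : List String) : Prop := out = filter_needed_imports_py_alt imports code
instance (imports : List String) (code : String) (out : List String) : Decidable (Spec_filter_needed_imports_py imports code out) := by unfold Spec_filter_needed_imports_py; infer_instance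

-- ===== CLAIM (what is proved, stated in full; the proofs are below) =====
def Claim_equal_filter_needed_imports_py : Prop := ∀ (imports : List String) (code : String), Dom_filter_needed_imports_py imports code → Spec_filter_needed_imports_py imports code (filter_needed_imports_py imports code)

-- ===== LEMMAS AND PROOFS =====

-- A's per-import test, phrased through B's token extractor.
theorem stepA_eq_token (code imp : String) :
    (if PySem.Str.isIn "import" imp then
      let parts := PySem.Str.split₀ imp
      if 2 ≤ parts.length then
        if PySem.Str.isIn (PySem.List.pyGetD parts (-1) "") code then true else false
      else false
    else false)
    = (match pvToken imp with
       | some t => PySem.Str.isIn t code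
       | none => false) := by
  unfold pvToken
  cases h1 : PySem.Str.isIn "import" imp with
  | false => simp
  | true =>
    by_cases h2 : 2 ≤ (PySem.Str.split₀ imp).length
    · simp only [if_pos h2]; simp
    · simp only [if_neg h2]; simp

-- A's loop is a filter by that test.
theorem portA_eq_filter (imports : List String) (code : String) :
    filter_needed_imports_py imports code
      = imports.filter (fun imp =>
          match pvToken imp with
          | some t => PySem.Str.isIn t code
          | none => false) := by
  unfold filter_needed_imports_py
  have h := PySem.List.foldl_append_if_eq_filter
      (l := imports) (acc := ([] : List String))
      (p := fun imp =>
        match pvToken imp with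
        | some t => PySem.Str.isIn t code
        | none => false)
  rw [List.nil_append] at h
  have hf : (fun (needed : List String) imp =>
      if PySem.Str.isIn "import" imp then
        let parts := PySem.Str.split₀ imp
        if 2 ≤ parts.length then
          let module_or_name := PySem.List.pyGetD parts (-1) ""
          if PySem.Str.isIn module_or_name code then needed ++ [imp] else needed
        else needed
      else needed)
      = (fun (acc : List String) imp =>
          if (match pvToken imp with
              | some t => PySem.Str.isIn t code
              | none => false) = true then acc ++ [imp] else acc) := by
    funext acc imp
    rw [← stepA_eq_token code imp]
    split_ifs <;> simp_all
  rw [hf]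
  exact h

-- Membership in B's precomputed set, for a token coming from the list.
theorem mem_present {imports : List String} {code : String} {imp : String} {t : String}
    (hmem : imp ∈ imports) (ht : pvToken imp = some t) :
    PySem.Set.contains
      (PySem.Set.ofList ((imports.filterMap pvToken).filter (fun t => PySem.Str.isIn t code))) t
      = PySem.Str.isIn t code := by
  by_cases h : PySem.Str.isIn t code = true
  · rw [h]
    rw [PySem.Set.contains_iff]
    rw [PySem.Set.mem_ofList, List.mem_filter]
    exact ⟨List.mem_filterMap.mpr ⟨imp, hmem, ht⟩, h⟩
  · rw [Bool.eq_false_iff.mpr h]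
    rw [Bool.eq_false_iff]
    intro hc
    rw [PySem.Set.contains_iff, PySem.Set.mem_ofList, List.mem_filter] at hc
    exact h hc.2

-- ===== VERDICT (by name: the statement is the Claim_ definition above) =====
theorem filter_needed_imports_py_spec : Claim_equal_filter_needed_imports_py := by
  intro imports code _
  unfold Spec_filter_needed_imports_py filter_needed_imports_py_alt
  rw [portA_eq_filter]
  apply List.filter_congr
  intro imp hmem
  cases ht : pvToken imp with
  | none => simp
  | some t => exact (mem_present hmem ht).symm
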